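-- pv_equiv track=rewrite | github.com/eliottcassidy2000/math | 04-computation/large_n_exploration.py | transitive_join
-- ===== SOURCE A (Python) =====
-- def transitive_join(adj1, n1, adj2, n2):
--     n = n1 + n2
--     adj = [[0]*n for _ in range(n)]
--     for i in range(n1):
--         for j in range(n1):
--             adj[i][j] = adj1[i][j]
--     for i in range(n2):
--         for j in range(n2):
--             adj[n1+i][n1+j] = adj2[i][j]
--     # T1 beats T2
--     for i in range(n1):
--         for j in range(n2):
--             adj[i][n1+j] = 1
--     return adj, n
-- ===== SOURCE B (Python) =====
-- def transitive_join(adj1, n1, adj2, n2):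
--     n = n1 + n2
--
--     def cell(i, j):
--         if i < n1:
--             return adj1[i][j] if j < n1 else 1
--         if j < n1:
--             return 0
--         return adj2[i - n1][j - n1]
--
--     return [[cell(i, j) for j in range(n)] for i in range(n)], n
-- ===== Notes on version B (the rewrite author's own statement) =====
-- stated objective: alternative
-- what changed: Defines the joined matrix pointwise by a pure index formula cell(i,j) (adj1 block if i,j<n1, 1 if i<n1<=j, 0 if j<n1<=i, shifted adj2 otherwise) evaluated in one nested comprehension, instead of pre-allocating a zero matrix and mutating it with three staged block-fill double loops.
-- outside the precondition, e.g. on transitive_join([], -1, [[1, 2], [3, 4]], 2): A returns ([[4]], 1), B returns ([[4]], 1)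
import Mathlib
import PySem

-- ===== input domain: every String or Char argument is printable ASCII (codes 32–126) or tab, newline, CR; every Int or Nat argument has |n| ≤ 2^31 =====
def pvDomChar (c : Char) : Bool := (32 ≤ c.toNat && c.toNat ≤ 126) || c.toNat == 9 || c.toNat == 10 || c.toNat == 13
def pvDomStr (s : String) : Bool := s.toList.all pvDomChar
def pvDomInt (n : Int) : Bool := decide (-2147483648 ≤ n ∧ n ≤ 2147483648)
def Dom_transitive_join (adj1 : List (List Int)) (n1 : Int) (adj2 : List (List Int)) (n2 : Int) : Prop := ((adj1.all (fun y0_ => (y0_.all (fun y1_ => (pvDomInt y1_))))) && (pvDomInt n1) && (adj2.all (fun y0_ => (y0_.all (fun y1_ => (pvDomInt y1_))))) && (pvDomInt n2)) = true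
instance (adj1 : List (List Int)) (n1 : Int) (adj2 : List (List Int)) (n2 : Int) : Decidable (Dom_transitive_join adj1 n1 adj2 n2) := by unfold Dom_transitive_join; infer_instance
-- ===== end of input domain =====

-- B defines the joined matrix pointwise by a pure index formula cell(i,j) evaluated in one
-- nested comprehension, instead of pre-allocating a zero matrix and mutating it with three
-- staged block-fill double loops (objective: alternative).

-- ===== PORT A =====
-- pySetD/pyGetD are the total forms of Python's indexing; exact under Pre_ (all indices in range);
-- outside Pre_ the Python raises IndexError or (for negative counts) hits negative-index wraparound.
def transitive_join (adj1 : List (List Int)) (n1 : Int) (adj2 : List (List Int)) (n2 : Int) : List (List Int) × Int :=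
  let n := n1 + n2
  let adj : List (List Int) := (PySem.List.pyRange 0 n 1).map (fun _ => PySem.List.pyRepeat [(0:Int)] n)
  let adj := (PySem.List.pyRange 0 n1 1).foldl (fun adj i =>
      (PySem.List.pyRange 0 n1 1).foldl (fun adj j =>
        PySem.List.pySetD adj i (PySem.List.pySetD (PySem.List.pyGetD adj i []) j
          (PySem.List.pyGetD (PySem.List.pyGetD adj1 i []) j 0))) adj) adj
  let adj := (PySem.List.pyRange 0 n2 1).foldl (fun adj i =>
      (PySem.List.pyRange 0 n2 1).foldl (fun adj j =>
        PySem.List.pySetD adj (n1 + i) (PySem.List.pySetD (PySem.List.pyGetD adj (n1 + i) []) (n1 + j)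
          (PySem.List.pyGetD (PySem.List.pyGetD adj2 i []) j 0))) adj) adj
  let adj := (PySem.List.pyRange 0 n1 1).foldl (fun adj i =>
      (PySem.List.pyRange 0 n2 1).foldl (fun adj j =>
        PySem.List.pySetD adj i (PySem.List.pySetD (PySem.List.pyGetD adj i []) (n1 + j) 1)) adj) adj
  (adj, n)

-- ===== PORT B =====
-- pyGetD is the total form of Python's indexing; exact under Pre_ (all indices B reads are in range).
def transitive_join_alt (adj1 : List (List Int)) (n1 : Int) (adj2 : List (List Int)) (n2 : Int) : List (List Int) × Int :=
  let n := n1 + n2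
  let cell : Int → Int → Int := fun i j =>
    if i < n1 then (if j < n1 then PySem.List.pyGetD (PySem.List.pyGetD adj1 i []) j 0 else 1)
    else if j < n1 then 0
    else PySem.List.pyGetD (PySem.List.pyGetD adj2 (i - n1) []) (j - n1) 0
  ((PySem.List.pyRange 0 n 1).map (fun i => (PySem.List.pyRange 0 n 1).map (fun j => cell i j)), n)

-- ===== PRECONDITION & SPEC =====
-- Pre_ excludes inputs with a negative count where the other count is positive: there A either raises
-- IndexError or returns an accidental negative-index-wraparound value. It keeps nonnegative counts with
-- matrices large enough for every index A uses, and counts that are both <= 0 (empty result).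
def Pre_transitive_join (adj1 : List (List Int)) (n1 : Int) (adj2 : List (List Int)) (n2 : Int) : Prop :=
  (0 ≤ n1 ∧ 0 ≤ n2 ∧ n1 ≤ (adj1.length : Int) ∧ n2 ≤ (adj2.length : Int) ∧
   (∀ r ∈ adj1.take n1.toNat, n1 ≤ (r.length : Int)) ∧ (∀ r ∈ adj2.take n2.toNat, n2 ≤ (r.length : Int)))
  ∨ (n1 ≤ 0 ∧ n2 ≤ 0)
instance (adj1 : List (List Int)) (n1 : Int) (adj2 : List (List Int)) (n2 : Int) : Decidable (Pre_transitive_join adj1 n1 adj2 n2) := by unfold Pre_transitive_join; infer_instance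
def pvWitness_transitive_join : List (List Int) × Int × List (List Int) × Int := ([[0,1],[0,0]], 2, [[0]], 1)

def Spec_transitive_join (adj1 : List (List Int)) (n1 : Int) (adj2 : List (List Int)) (n2 : Int) (out : List (List Int) × Int) : Prop := out = transitive_join_alt adj1 n1 adj2 n2
instance (adj1 : List (List Int)) (n1 : Int) (adj2 : List (List Int)) (n2 : Int) (out : List (List Int) × Int) : Decidable (Spec_transitive_join adj1 n1 adj2 n2 out) := by unfold Spec_transitive_join; infer_instance

-- ===== CLAIM (what is proved, stated in full; the proofs are below) =====
def Claim_equal_transitive_join : Prop := ∀ (adj1 : List (List Int)) (n1 : Int) (adj2 : List (List Int)) (n2 : Int), Dom_transitive_join adj1 n1 adj2 n2 → Pre_transitive_join adj1 n1 adj2 n2 → Spec_transitive_join adj1 n1 adj2 n2 (transitive_join adj1 n1 adj2 n2)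

-- ===== LEMMAS AND PROOFS =====

theorem foldl_pyRange_nat {β : Type} (m : Nat) (f : β → Int → β) (init : β) :
    (PySem.List.pyRange 0 (m : Int) 1).foldl f init
      = (List.range m).foldl (fun a (k : Nat) => f a (k : Int)) init := by
  rw [PySem.List.pyRange_one]
  simp only [Int.sub_zero, Int.toNat_natCast]
  rw [List.foldl_map]
  simp only [Int.zero_add]

theorem setFold {α : Type} (d : α) (G : Nat → α → α) :
    ∀ (m : Nat) (off : Nat) (xs : List α), off + m ≤ xs.length →
    (List.range m).foldl (fun a k => a.set (off + k) (G k (a.getD (off + k) d))) xs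
      = xs.take off ++ (List.range m).map (fun k => G k (xs.getD (off + k) d)) ++ xs.drop (off + m) := by
  intro m
  induction m with
  | zero => intro off xs h; simp
  | succ m ih =>
    intro off xs h
    rw [List.range_succ, List.foldl_append, List.map_append, ih off xs (by omega)]
    have hto : (xs.take off).length = off := by rw [List.length_take]; omega
    have hmap : ((List.range m).map (fun k => G k (xs.getD (off + k) d))).length = m := by simp
    have hlt : off + m < xs.length := by omega
    have hdrop : xs.drop (off + m) = xs[off + m] :: xs.drop (off + m + 1) :=
      List.drop_eq_getElem_cons hlt
    have hget : ((xs.take off ++ (List.range m).map (fun k => G k (xs.getD (off + k) d))) ++ xs.drop (off + m)).getD (off + m) d = xs.getD (off + m) d := by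
      rw [List.getD_eq_getElem?_getD, List.getElem?_append_right (by rw [List.length_append, hto, hmap]),
          List.length_append, hto, hmap, hdrop]
      have : off + m - (off + m) = 0 := by omega
      rw [this]
      simp [List.getD_eq_getElem?_getD, List.getElem?_eq_getElem hlt]
    simp only [List.foldl_cons, List.foldl_nil, List.append_assoc] at *
    rw [hget]
    rw [List.set_append, if_neg (by omega), hto]
    rw [List.set_append, if_neg (by omega), hmap]
    have : off + m - off - m = 0 := by omega
    rw [this, hdrop, List.set_cons_zero]
    simp [List.getD_eq_getElem?_getD, List.getElem?_eq_getElem hlt]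
    omega

theorem foldl_congr_invariant {β ι : Type} (P : β → Prop) :
    ∀ (l : List ι) (f g : β → ι → β) (init : β), P init →
    (∀ b x, P b → x ∈ l → f b x = g b x ∧ P (g b x)) →
    l.foldl f init = l.foldl g init := by
  intro l
  induction l with
  | nil => intro f g init _ _; rfl
  | cons x xs ih =>
    intro f g init hP hfg
    obtain ⟨heq, hP'⟩ := hfg init x hP (by simp)
    simp only [List.foldl_cons, heq]
    exact ih f g (g init x) hP' (fun b y hb hy => hfg b y hb (by simp [hy]))

theorem rowLocal {α : Type} :
    ∀ (js : List Nat) (a : List (List α)) (k : Nat), k < a.length → ∀ (R : List α → Nat → List α),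
    js.foldl (fun a j => a.set k (R (a.getD k []) j)) a
      = a.set k (js.foldl R (a.getD k [])) := by
  intro js
  induction js with
  | nil =>
    intro a k hk R
    simp only [List.foldl_nil]
    rw [List.getD_eq_getElem _ _ hk, List.set_getElem_self]
  | cons j js ih =>
    intro a k hk R
    simp only [List.foldl_cons]
    rw [ih _ k (by simpa using hk) R]
    have hget : (a.set k (R (a.getD k []) j)).getD k [] = R (a.getD k []) j := by
      rw [List.getD_eq_getElem _ _ (by simpa using hk), List.getElem_set_self (by simpa using hk)]
    rw [hget, List.set_set]

theorem rowFillSeg {α : Type} (d : α) (v : Nat → α) (m off : Nat) (xs : List α)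
    (h : off + m ≤ xs.length) :
    (List.range m).foldl (fun r j => r.set (off + j) (v j)) xs
      = xs.take off ++ (List.range m).map v ++ xs.drop (off + m) := by
  have := setFold d (fun j _ => v j) m off xs h
  simpa using this

theorem blockWrite (N off_r mo off_c mi : Nat) (v : Nat → Nat → Int)
    (adj : List (List Int)) (hlen : adj.length = N) (hrows : ∀ r ∈ adj, r.length = N)
    (h1 : off_r + mo ≤ N) (h2 : off_c + mi ≤ N) :
    (List.range mo).foldl (fun a k =>
        (List.range mi).foldl (fun a j =>
          a.set (off_r + k) ((a.getD (off_r + k) []).set (off_c + j) (v k j))) a) adj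
      = adj.take off_r
        ++ (List.range mo).map (fun k =>
             (adj.getD (off_r + k) []).take off_c ++ (List.range mi).map (v k)
               ++ (adj.getD (off_r + k) []).drop (off_c + mi))
        ++ adj.drop (off_r + mo) := by
  rw [foldl_congr_invariant (fun a => a.length = N ∧ ∀ r ∈ a, r.length = N) (List.range mo) _
      (fun a k => a.set (off_r + k)
        ((a.getD (off_r + k) []).take off_c ++ (List.range mi).map (v k)
          ++ (a.getD (off_r + k) []).drop (off_c + mi))) adj ⟨hlen, hrows⟩ ?_]
  · exact setFold [] (fun k r => r.take off_c ++ (List.range mi).map (v k) ++ r.drop (off_c + mi))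
      mo off_r adj (by omega)
  · intro a k hP hk
    obtain ⟨ha, har⟩ := hP
    have hk' : off_r + k < a.length := by
      rw [ha]; have := List.mem_range.mp hk; omega
    have hmem : a.getD (off_r + k) [] ∈ a := by
      rw [List.getD_eq_getElem _ _ hk']; exact List.getElem_mem _
    have hrow : (a.getD (off_r + k) []).length = N := har _ hmem
    constructor
    · show _ = a.set (off_r + k) _
      rw [rowLocal (List.range mi) a (off_r + k) hk' (fun r j => r.set (off_c + j) (v k j)),
          rowFillSeg (0:Int) (v k) mi off_c _ (by rw [hrow]; omega)]
    · constructor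
      · simpa using ha
      · intro r hr
        rcases List.mem_or_eq_of_mem_set hr with h | h
        · exact har r h
        · subst h
          simp only [List.length_append, List.length_take, List.length_map,
            List.length_range, List.length_drop, hrow]
          omega

theorem blockWrite0c (N mo off_c mi : Nat) (v : Nat → Nat → Int)
    (adj : List (List Int)) (hlen : adj.length = N) (hrows : ∀ r ∈ adj, r.length = N)
    (h1 : mo ≤ N) (h2 : off_c + mi ≤ N) :
    (List.range mo).foldl (fun a k =>
        (List.range mi).foldl (fun a j =>
          a.set k ((a.getD k []).set (off_c + j) (v k j))) a) adj
      = (List.range mo).map (fun k =>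
             (adj.getD k []).take off_c ++ (List.range mi).map (v k)
               ++ (adj.getD k []).drop (off_c + mi))
        ++ adj.drop mo := by
  have := blockWrite N 0 mo off_c mi v adj hlen hrows (by omega) h2
  simpa using this

theorem blockWrite00 (N mo mi : Nat) (v : Nat → Nat → Int)
    (adj : List (List Int)) (hlen : adj.length = N) (hrows : ∀ r ∈ adj, r.length = N)
    (h1 : mo ≤ N) (h2 : mi ≤ N) :
    (List.range mo).foldl (fun a k =>
        (List.range mi).foldl (fun a j =>
          a.set k ((a.getD k []).set j (v k j))) a) adj
      = (List.range mo).map (fun k =>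
             (List.range mi).map (v k) ++ (adj.getD k []).drop mi)
        ++ adj.drop mo := by
  have := blockWrite N 0 mo 0 mi v adj hlen hrows (by omega) (by omega)
  simpa using this

-- shared index-grid normal form: a map over pyRange 0 (m1+m2) split into the four Nat-indexed blocks
theorem grid_norm (m1 m2 : Nat) (cell : Int → Int → Int) :
    (PySem.List.pyRange 0 ((m1:Int)+(m2:Int)) 1).map (fun i => (PySem.List.pyRange 0 ((m1:Int)+(m2:Int)) 1).map (fun j => cell i j))
      = (List.range m1).map (fun (k : Nat) =>
          (List.range m1).map (fun (j : Nat) => cell (k:Int) (j:Int)) ++ (List.range m2).map (fun (j : Nat) => cell (k:Int) ((m1+j:Nat):Int)))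
        ++ (List.range m2).map (fun (k : Nat) =>
          (List.range m1).map (fun (j : Nat) => cell ((m1+k:Nat):Int) (j:Int)) ++ (List.range m2).map (fun (j : Nat) => cell ((m1+k:Nat):Int) ((m1+j:Nat):Int))) := by
  have hN : ((m1 : Int) + (m2 : Int)) = ((m1 + m2 : Nat) : Int) := by push_cast; ring
  rw [hN, PySem.List.pyRange_one]
  simp only [Int.sub_zero, Int.toNat_natCast]
  rw [List.range_add]
  simp only [List.map_append, List.map_map, Function.comp_def, Int.zero_add]

-- B's side reduced to the block normal form shared with A's side.
theorem alt_norm (adj1 : List (List Int)) (adj2 : List (List Int)) (m1 m2 : Nat) :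
    transitive_join_alt adj1 (m1 : Int) adj2 (m2 : Int)
      = ((List.range m1).map (fun k =>
            (List.range m1).map (fun j => (adj1.getD k []).getD j 0) ++ List.replicate m2 (1:Int))
         ++ (List.range m2).map (fun k =>
            List.replicate m1 (0:Int) ++ (List.range m2).map (fun j => (adj2.getD k []).getD j 0)),
         (m1 : Int) + (m2 : Int)) := by
  unfold transitive_join_alt
  refine Prod.ext ?_ rfl
  show (PySem.List.pyRange 0 ((m1:Int)+(m2:Int)) 1).map
      (fun i => (PySem.List.pyRange 0 ((m1:Int)+(m2:Int)) 1).map (fun j =>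
        if i < (m1:Int) then (if j < (m1:Int) then PySem.List.pyGetD (PySem.List.pyGetD adj1 i []) j 0 else 1)
        else if j < (m1:Int) then 0
        else PySem.List.pyGetD (PySem.List.pyGetD adj2 (i - (m1:Int)) []) (j - (m1:Int)) 0)) = _
  rw [grid_norm m1 m2]
  congr 1
  · apply List.map_congr_left
    intro k hk
    have hk' : k < m1 := List.mem_range.mp hk
    congr 1
    · apply List.map_congr_left
      intro j hj
      have hj' : j < m1 := List.mem_range.mp hj
      rw [if_pos (by exact_mod_cast hk'), if_pos (by exact_mod_cast hj'),
          PySem.List.pyGetD_natCast, PySem.List.pyGetD_natCast]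
    · have : ∀ j ∈ List.range m2,
          (if (k:Int) < (m1:Int) then
            (if ((m1+j:Nat):Int) < (m1:Int) then PySem.List.pyGetD (PySem.List.pyGetD adj1 (k:Int) []) ((m1+j:Nat):Int) 0 else 1)
          else if ((m1+j:Nat):Int) < (m1:Int) then 0
          else PySem.List.pyGetD (PySem.List.pyGetD adj2 ((k:Int) - (m1:Int)) []) (((m1+j:Nat):Int) - (m1:Int)) 0) = (1:Int) := by
        intro j _
        rw [if_pos (by exact_mod_cast hk'), if_neg (by push_cast; omega)]
      rw [List.map_congr_left this, List.map_const', List.length_range]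
  · apply List.map_congr_left
    intro k hk
    have hk' : k < m2 := List.mem_range.mp hk
    congr 1
    · have : ∀ j ∈ List.range m1,
          (if ((m1+k:Nat):Int) < (m1:Int) then
            (if (j:Int) < (m1:Int) then PySem.List.pyGetD (PySem.List.pyGetD adj1 ((m1+k:Nat):Int) []) (j:Int) 0 else 1)
          else if (j:Int) < (m1:Int) then 0
          else PySem.List.pyGetD (PySem.List.pyGetD adj2 (((m1+k:Nat):Int) - (m1:Int)) []) ((j:Int) - (m1:Int)) 0) = (0:Int) := by
        intro j hj
        have hj' : j < m1 := List.mem_range.mp hj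
        rw [if_neg (by push_cast; omega), if_pos (by exact_mod_cast hj')]
      rw [List.map_congr_left this, List.map_const', List.length_range]
    · apply List.map_congr_left
      intro j hj
      rw [if_neg (by push_cast; omega), if_neg (by push_cast; omega)]
      have e1 : ((m1 + k : Nat) : Int) - (m1:Int) = (k : Int) := by push_cast; ring
      have e2 : ((m1 + j : Nat) : Int) - (m1:Int) = (j : Int) := by push_cast; ring
      rw [e1, e2, PySem.List.pyGetD_natCast, PySem.List.pyGetD_natCast]

theorem tj_main (adj1 : List (List Int)) (adj2 : List (List Int)) (m1 m2 : Nat) :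
    transitive_join adj1 (m1 : Int) adj2 (m2 : Int) = transitive_join_alt adj1 (m1 : Int) adj2 (m2 : Int) := by
  rw [alt_norm]
  unfold transitive_join
  have hN : ((m1 : Int) + (m2 : Int)) = ((m1 + m2 : Nat) : Int) := by push_cast; ring
  rw [hN]
  simp only [foldl_pyRange_nat]
  simp only [← Nat.cast_add, PySem.List.pySetD_natCast, PySem.List.pyGetD_natCast]
  -- initial zero matrix
  have hE0 : (List.map (fun _ => PySem.List.pyRepeat [(0:Int)] ((m1 + m2 : Nat) : Int))
      (PySem.List.pyRange 0 ((m1 + m2 : Nat) : Int) 1))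
      = List.replicate (m1 + m2) (List.replicate (m1 + m2) (0:Int)) := by
    rw [PySem.List.pyRange_one]
    simp only [PySem.List.pyRepeat_singleton, Int.toNat_natCast,
      List.map_const', List.length_map, List.length_range, Int.sub_zero]
  rw [hE0]
  -- loop 1
  rw [blockWrite00 (m1 + m2) m1 m1 (fun k j => (adj1.getD k []).getD j 0)
      (List.replicate (m1 + m2) (List.replicate (m1 + m2) (0:Int)))
      (by simp) (fun r hr => by rw [List.eq_of_mem_replicate hr]; simp)
      (by omega) (by omega)]
  have hM1 : (List.range m1).map (fun k =>
        (List.range m1).map (fun j => (adj1.getD k []).getD j 0)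
          ++ ((List.replicate (m1 + m2) (List.replicate (m1 + m2) (0:Int))).getD k []).drop m1)
      ++ (List.replicate (m1 + m2) (List.replicate (m1 + m2) (0:Int))).drop m1
      = (List.range m1).map (fun k =>
          (List.range m1).map (fun j => (adj1.getD k []).getD j 0) ++ List.replicate m2 (0:Int))
        ++ List.replicate m2 (List.replicate (m1 + m2) (0:Int)) := by
    rw [List.drop_replicate]
    congr 1
    · apply List.map_congr_left
      intro k hk
      rw [List.getD_replicate _ (by simp at hk; omega), List.drop_replicate]
      congr 2
      omega
    · congr 1
      omega
  rw [hM1]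
  -- loop 2
  rw [blockWrite (m1 + m2) m1 m2 m1 m2 (fun k j => (adj2.getD k []).getD j 0)
      ((List.range m1).map (fun k =>
          (List.range m1).map (fun j => (adj1.getD k []).getD j 0) ++ List.replicate m2 (0:Int))
        ++ List.replicate m2 (List.replicate (m1 + m2) (0:Int)))
      (by simp) (fun r hr => by
        rcases List.mem_append.mp hr with h | h
        · obtain ⟨k, _, rfl⟩ := List.mem_map.mp h
          simp
        · rw [List.eq_of_mem_replicate h]; simp)
      (by omega) (by omega)]
  have hfstlen : ((List.range m1).map (fun k =>
      (List.range m1).map (fun j => (adj1.getD k []).getD j 0) ++ List.replicate m2 (0:Int))).length = m1 := by simp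
  have hM2 : (((List.range m1).map (fun k =>
          (List.range m1).map (fun j => (adj1.getD k []).getD j 0) ++ List.replicate m2 (0:Int))
        ++ List.replicate m2 (List.replicate (m1 + m2) (0:Int)))).take m1
      ++ (List.range m2).map (fun k =>
          ((((List.range m1).map (fun k =>
              (List.range m1).map (fun j => (adj1.getD k []).getD j 0) ++ List.replicate m2 (0:Int))
            ++ List.replicate m2 (List.replicate (m1 + m2) (0:Int)))).getD (m1 + k) []).take m1
          ++ (List.range m2).map (fun j => (adj2.getD k []).getD j 0)
          ++ ((((List.range m1).map (fun k =>
              (List.range m1).map (fun j => (adj1.getD k []).getD j 0) ++ List.replicate m2 (0:Int))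
            ++ List.replicate m2 (List.replicate (m1 + m2) (0:Int)))).getD (m1 + k) []).drop (m1 + m2))
      ++ (((List.range m1).map (fun k =>
          (List.range m1).map (fun j => (adj1.getD k []).getD j 0) ++ List.replicate m2 (0:Int))
        ++ List.replicate m2 (List.replicate (m1 + m2) (0:Int)))).drop (m1 + m2)
      = (List.range m1).map (fun k =>
          (List.range m1).map (fun j => (adj1.getD k []).getD j 0) ++ List.replicate m2 (0:Int))
        ++ (List.range m2).map (fun k =>
          List.replicate m1 (0:Int) ++ (List.range m2).map (fun j => (adj2.getD k []).getD j 0)) := by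
    rw [List.take_left' hfstlen, List.drop_of_length_le (by simp), List.append_nil]
    congr 1
    apply List.map_congr_left
    intro k hk
    rw [List.getD_append_right _ _ _ _ (by rw [hfstlen]; omega), hfstlen]
    have : m1 + k - m1 = k := by omega
    rw [this, List.getD_replicate _ (by simp at hk; omega)]
    rw [List.take_replicate, List.drop_replicate]
    have h3 : min m1 (m1 + m2) = m1 := by omega
    have h4 : m1 + m2 - (m1 + m2) = 0 := by omega
    rw [h3, h4]
    simp
  rw [hM2]
  -- loop 3
  rw [blockWrite0c (m1 + m2) m1 m1 m2 (fun _ _ => (1:Int))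
      ((List.range m1).map (fun k =>
          (List.range m1).map (fun j => (adj1.getD k []).getD j 0) ++ List.replicate m2 (0:Int))
        ++ (List.range m2).map (fun k =>
          List.replicate m1 (0:Int) ++ (List.range m2).map (fun j => (adj2.getD k []).getD j 0)))
      (by simp) (fun r hr => by
        rcases List.mem_append.mp hr with h | h
        · obtain ⟨k, _, rfl⟩ := List.mem_map.mp h
          simp
        · obtain ⟨k, _, rfl⟩ := List.mem_map.mp h
          simp)
      (by omega) (by omega)]
  have hM3 : (List.range m1).map (fun k =>
        ((((List.range m1).map (fun k =>
            (List.range m1).map (fun j => (adj1.getD k []).getD j 0) ++ List.replicate m2 (0:Int))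
          ++ (List.range m2).map (fun k =>
            List.replicate m1 (0:Int) ++ (List.range m2).map (fun j => (adj2.getD k []).getD j 0)))).getD k []).take m1
        ++ (List.range m2).map (fun _ => (1:Int))
        ++ ((((List.range m1).map (fun k =>
            (List.range m1).map (fun j => (adj1.getD k []).getD j 0) ++ List.replicate m2 (0:Int))
          ++ (List.range m2).map (fun k =>
            List.replicate m1 (0:Int) ++ (List.range m2).map (fun j => (adj2.getD k []).getD j 0)))).getD k []).drop (m1 + m2))
      ++ (((List.range m1).map (fun k =>
          (List.range m1).map (fun j => (adj1.getD k []).getD j 0) ++ List.replicate m2 (0:Int))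
        ++ (List.range m2).map (fun k =>
          List.replicate m1 (0:Int) ++ (List.range m2).map (fun j => (adj2.getD k []).getD j 0)))).drop m1
      = (List.range m1).map (fun k =>
          (List.range m1).map (fun j => (adj1.getD k []).getD j 0) ++ List.replicate m2 (1:Int))
        ++ (List.range m2).map (fun k =>
          List.replicate m1 (0:Int) ++ (List.range m2).map (fun j => (adj2.getD k []).getD j 0)) := by
    rw [List.drop_left' hfstlen]
    congr 1
    apply List.map_congr_left
    intro k hk
    rw [List.getD_append _ _ _ _ (by rw [hfstlen]; simp at hk; omega)]
    rw [PySem.List.getD_map_range _ _ _ _ (by simp at hk; omega)]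
    rw [List.take_left' (by simp), List.drop_of_length_le (by simp), List.append_nil]
    congr 1
    simp [List.map_const']
  rw [hM3]

-- ===== VERDICT (by name: the statement is the Claim_ definition above) =====
theorem transitive_join_spec : Claim_equal_transitive_join := by
  intro adj1 n1 adj2 n2 _ hpre
  unfold Spec_transitive_join
  rcases hpre with ⟨h1, h2, -, -, -, -⟩ | ⟨h1, h2⟩
  case inr =>
    have ha : n1 + n2 ≤ 0 := by omega
    unfold transitive_join transitive_join_alt
    simp [PySem.List.pyRange_one_eq_nil h1, PySem.List.pyRange_one_eq_nil h2,
      PySem.List.pyRange_one_eq_nil ha]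
  case inl =>
  obtain ⟨m1, rfl⟩ : ∃ m : Nat, n1 = (m : Int) := ⟨n1.toNat, (Int.toNat_of_nonneg h1).symm⟩
  obtain ⟨m2, rfl⟩ : ∃ m : Nat, n2 = (m : Int) := ⟨n2.toNat, (Int.toNat_of_nonneg h2).symm⟩
  exact tj_main adj1 adj2 m1 m2
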